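-- pv_equiv track=rewrite | github.com/iredox10/budgetExtractor | receipts.py | _select_label_index
-- ===== SOURCE A (Python) =====
-- from typing import Optional
--
-- def _select_label_index(labels: list[str], target_year: str) -> Optional[int]:
--     if not labels:
--         return None
--     for idx, label in enumerate(labels):
--         if label.startswith(target_year) and "approved" in label:
--             return idx
--     for idx, label in enumerate(labels):
--         if label.startswith(target_year):
--             return idx
--     return None
-- ===== SOURCE B (Python) =====
-- from typing import Optional
--
-- def _select_label_index(labels: list[str], target_year: str) -> Optional[int]:
--     fallback = None
--     for idx, label in enumerate(labels):
--         if label.startswith(target_year):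
--             if "approved" in label:
--                 return idx
--             if fallback is None:
--                 fallback = idx
--     return fallback
-- ===== Notes on version B (the rewrite author's own statement) =====
-- stated objective: simpler
-- what changed: Folds A's two sequential scans over labels into a single pass that returns immediately on an approved year-match and otherwise remembers the earliest year-prefix index as a fallback.
import Mathlib
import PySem

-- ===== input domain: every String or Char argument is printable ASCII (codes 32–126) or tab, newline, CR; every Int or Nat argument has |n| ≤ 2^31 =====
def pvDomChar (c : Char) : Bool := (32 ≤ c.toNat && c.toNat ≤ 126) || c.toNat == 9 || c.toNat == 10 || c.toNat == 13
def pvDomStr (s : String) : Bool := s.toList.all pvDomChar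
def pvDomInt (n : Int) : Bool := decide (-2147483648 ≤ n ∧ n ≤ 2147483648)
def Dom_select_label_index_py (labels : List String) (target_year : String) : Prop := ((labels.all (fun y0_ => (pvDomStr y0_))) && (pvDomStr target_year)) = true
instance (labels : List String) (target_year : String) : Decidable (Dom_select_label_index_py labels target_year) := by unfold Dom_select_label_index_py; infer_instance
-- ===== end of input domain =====

-- B folds A's two sequential scans into one pass with a remembered fallback index (objective: simpler).

-- ===== PORT A =====
-- first loop of A: first idx with label.startswith(target_year) and "approved" in label
def pvA_scan1 (target : String) : List String → Int → Option Int
  | [], _ => none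
  | l :: rest, i =>
    if PySem.Str.startswith l target && PySem.Str.isIn "approved" l then some i
    else pvA_scan1 target rest (i + 1)

-- second loop of A: first idx with label.startswith(target_year)
def pvA_scan2 (target : String) : List String → Int → Option Int
  | [], _ => none
  | l :: rest, i =>
    if PySem.Str.startswith l target then some i
    else pvA_scan2 target rest (i + 1)

def select_label_index_py (labels : List String) (target_year : String) : Option Int :=
  if labels = [] then none
  else
    match pvA_scan1 target_year labels 0 with
    | some i => some i
    | none => pvA_scan2 target_year labels 0

-- ===== PORT B =====
-- single pass: return on approved year-match, remember first year-prefix index as fallback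
def pvB_loop (target : String) : List String → Int → Option Int → Option Int
  | [], _, fb => fb
  | l :: rest, i, fb =>
    if PySem.Str.startswith l target then
      if PySem.Str.isIn "approved" l then some i
      else pvB_loop target rest (i + 1) (if fb = none then some i else fb)
    else pvB_loop target rest (i + 1) fb

def select_label_index_py_alt (labels : List String) (target_year : String) : Option Int :=
  pvB_loop target_year labels 0 none

-- ===== PRECONDITION & SPEC =====
def Spec_select_label_index_py (labels : List String) (target_year : String) (out : Option Int) : Prop := out = select_label_index_py_alt labels target_year
instance (labels : List String) (target_year : String) (out : Option Int) : Decidable (Spec_select_label_index_py labels target_year out) := by unfold Spec_select_label_index_py; infer_instance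

-- ===== CLAIM (what is proved, stated in full; the proofs are below) =====
def Claim_equal_select_label_index_py : Prop := ∀ (labels : List String) (target_year : String), Dom_select_label_index_py labels target_year → Spec_select_label_index_py labels target_year (select_label_index_py labels target_year)

-- ===== LEMMAS AND PROOFS =====

-- loop invariant: B's single pass equals scan1, falling back to fb, then scan2
theorem pvB_loop_eq (target : String) (ls : List String) :
    ∀ (i : Int) (fb : Option Int),
      pvB_loop target ls i fb =
        (match pvA_scan1 target ls i with
         | some j => some j
         | none => match fb with
           | some f => some f
           | none => pvA_scan2 target ls i) := by
  induction ls with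
  | nil => intro i fb; cases fb <;> simp [pvB_loop, pvA_scan1, pvA_scan2]
  | cons l rest ih =>
    intro i fb
    by_cases hs : PySem.Chars.startswith l.toList target.toList = true
    · by_cases ha : PySem.Chars.isIn ['a','p','p','r','o','v','e','d'] l.toList = true
      · simp [pvB_loop, pvA_scan1, hs, ha]
      · simp only [pvB_loop, pvA_scan1, PySem.Str.startswith_eq, PySem.Str.isIn_eq,
          hs, ha, if_true, Bool.and_eq_true, ih]
        cases fb <;> simp [pvA_scan2, PySem.Str.startswith_eq, hs] <;> rw [if_neg ha] <;> rw [if_neg ha]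
    · simp only [pvB_loop, pvA_scan1, pvA_scan2, PySem.Str.startswith_eq,
        PySem.Str.isIn_eq, hs, Bool.false_eq_true, if_false, false_and, ih]
      rfl

-- ===== VERDICT (by name: the statement is the Claim_ definition above) =====
theorem select_label_index_py_spec : Claim_equal_select_label_index_py := by
  intro labels target_year _
  unfold Spec_select_label_index_py select_label_index_py select_label_index_py_alt
  rw [pvB_loop_eq]
  cases labels with
  | nil => simp [pvA_scan1, pvA_scan2]
  | cons l rest => simp
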